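-- pv_equiv track=rewrite | github.com/fodinabor/impala | test/run.py | isBroken
-- ===== SOURCE A (Python) =====
-- def isBroken(X):
--     for x in X:
--         if (x=='broken'):
--             res = []
--             for y in X:
--                 if y!=x:
--                     res.append(y)
--             return True,res
--     return False, X
-- ===== SOURCE B (Python) =====
-- def isBroken(X):
--     res = []
--     found = False
--     for x in X:
--         if x == 'broken':
--             found = True
--         else:
--             res.append(x)
--     if found:
--         return True, res
--     return False, X
-- ===== Notes on version B (the rewrite author's own statement) =====
-- stated objective: simpler
-- what changed: Single pass with a found flag and one result list, instead of a detect scan followed by a second full filtering scan.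
import Mathlib
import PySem

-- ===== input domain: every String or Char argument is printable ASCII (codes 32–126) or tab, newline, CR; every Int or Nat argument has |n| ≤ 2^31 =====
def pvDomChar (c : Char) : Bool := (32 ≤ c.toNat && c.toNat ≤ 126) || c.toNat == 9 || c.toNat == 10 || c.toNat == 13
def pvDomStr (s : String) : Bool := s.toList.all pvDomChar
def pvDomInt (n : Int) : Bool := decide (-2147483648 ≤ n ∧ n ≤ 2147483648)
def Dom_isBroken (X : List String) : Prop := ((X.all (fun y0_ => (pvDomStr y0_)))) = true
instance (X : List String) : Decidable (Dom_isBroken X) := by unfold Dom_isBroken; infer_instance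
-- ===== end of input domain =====

-- B folds once with a found flag and one result list, instead of A's detect scan
-- followed by a second filtering scan (simpler decomposition; same cost).
-- ===== PORT A =====
def isBrokenGo (X : List String) : List String → Bool × List String
  | [] => (false, X)
  | x :: rest =>
    if x == "broken" then
      (true, X.foldl (fun res y => if y != x then res ++ [y] else res) [])
    else isBrokenGo X rest

def isBroken (X : List String) : Bool × List String := isBrokenGo X X

-- ===== PORT B =====
def isBroken_alt (X : List String) : Bool × List String :=
  let s := X.foldl (fun (s : Bool × List String) x =>
    if x == "broken" then (true, s.2) else (s.1, s.2 ++ [x])) (false, [])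
  if s.1 then (true, s.2) else (false, X)

-- ===== PRECONDITION & SPEC =====
def Spec_isBroken (X : List String) (out : Bool × List String) : Prop := out = isBroken_alt X
instance (X : List String) (out : Bool × List String) : Decidable (Spec_isBroken X out) := by unfold Spec_isBroken; infer_instance

-- ===== CLAIM (what is proved, stated in full; the proofs are below) =====
def Claim_equal_isBroken : Prop := ∀ (X : List String), Dom_isBroken X → Spec_isBroken X (isBroken X)

-- ===== LEMMAS AND PROOFS =====

-- ===== VERDICT (by name: the statement is the Claim_ definition above) =====
theorem filterFold (l acc : List String) :
    l.foldl (fun res y => if y != "broken" then res ++ [y] else res) acc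
    = acc ++ l.filter (fun y => y != "broken") := by
  induction l generalizing acc with
  | nil => simp
  | cons x rest ih =>
    simp only [List.foldl_cons]
    by_cases hx : x = "broken"
    · rw [if_neg (by simp [hx]), ih]
      simp [hx]
    · rw [if_pos (by simp [hx]), ih]
      simp [hx]

theorem altFold (l : List String) (f : Bool) (acc : List String) :
    l.foldl (fun (s : Bool × List String) x =>
      if x == "broken" then (true, s.2) else (s.1, s.2 ++ [x])) (f, acc)
    = (f || l.contains "broken", acc ++ l.filter (fun x => x != "broken")) := by
  induction l generalizing f acc with
  | nil => simp
  | cons x rest ih =>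
    simp only [List.foldl_cons]
    by_cases hx : x = "broken"
    · rw [if_pos (by simp [hx]), ih]
      simp [hx]
    · rw [if_neg (by simp [hx]), ih]
      simp [hx, Ne.symm hx]

theorem aGo (X l : List String) :
    isBrokenGo X l =
      if l.contains "broken" then
        (true, X.filter (fun y => y != "broken"))
      else (false, X) := by
  induction l with
  | nil => simp [isBrokenGo]
  | cons x rest ih =>
    unfold isBrokenGo
    by_cases hx : x = "broken"
    · subst hx
      rw [if_pos (by simp), filterFold]
      simp
    · rw [if_neg (by simp [hx]), ih]
      simp [Ne.symm hx]

theorem isBroken_spec : Claim_equal_isBroken := by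
  intro X _
  unfold Spec_isBroken isBroken isBroken_alt
  rw [aGo, altFold]
  by_cases h : X.contains "broken" <;> simp
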